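-- pv_equiv track=rewrite | github.com/Spolonus282/word-search-game | Check.py | assignNums
-- ===== SOURCE A (Python) =====
-- Positions = {'0':  [0,0], '1':  [1,0], '2':  [2,0], '3':  [3,0],
--              '4':  [0,1], '5':  [1,1], '6':  [2,1], '7':  [3,1],
--              '8':  [0,2], '9':  [1,2], '10': [2,2], '11': [3,2],
--              '12': [0,3], '13': [1,3], '14': [2,3], '15': [3,3]}
--
-- def assignNums(Input, Surface, valueOn):
--     'Assign coords'
--     a = Input[valueOn]
--     b = list(Surface)
--     z = []
--     while True:
--         try:
--             e = b.index(a)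
--             z.append(Positions['{0}'.format(e)])
--             b[e] = '#'
--         except ValueError:
--             break
--     p = Surface.count(Input[valueOn])
--     return z
-- ===== SOURCE B (Python) =====
-- Positions = {'0':  [0,0], '1':  [1,0], '2':  [2,0], '3':  [3,0],
--              '4':  [0,1], '5':  [1,1], '6':  [2,1], '7':  [3,1],
--              '8':  [0,2], '9':  [1,2], '10': [2,2], '11': [3,2],
--              '12': [0,3], '13': [1,3], '14': [2,3], '15': [3,3]}
--
-- def assignNums(Input, Surface, valueOn):
--     'Assign coords'
--     target = Input[valueOn]
--     out = []
--     for i, ch in enumerate(Surface):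
--         if ch == target:
--             out.append(Positions['{0}'.format(i)])
--     return out
-- ===== Notes on version B (the rewrite author's own statement) =====
-- stated objective: simpler
-- what changed: A repeatedly rescans a mutated copy of Surface with list.index and overwrites each hit with '#'; B makes one forward enumerate pass over Surface, appending Positions[str(i)] on each match, with no copy or mutation.
import Mathlib
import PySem

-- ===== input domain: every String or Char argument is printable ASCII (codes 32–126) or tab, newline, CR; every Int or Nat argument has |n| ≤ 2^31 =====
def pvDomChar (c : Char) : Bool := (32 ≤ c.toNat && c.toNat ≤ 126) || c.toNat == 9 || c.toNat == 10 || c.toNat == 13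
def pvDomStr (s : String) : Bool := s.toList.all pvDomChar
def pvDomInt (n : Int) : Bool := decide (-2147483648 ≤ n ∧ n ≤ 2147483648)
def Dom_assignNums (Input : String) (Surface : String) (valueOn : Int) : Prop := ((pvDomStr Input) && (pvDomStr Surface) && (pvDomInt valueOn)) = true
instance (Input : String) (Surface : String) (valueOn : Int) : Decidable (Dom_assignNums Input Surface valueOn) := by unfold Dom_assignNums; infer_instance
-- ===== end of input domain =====

-- B replaces A's repeated destructive list.index scans with one forward enumerate pass (objective: simpler).
-- Equivalence of RETURN values only; A's unused `p = Surface.count(...)` line is pure and dropped in the port.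

-- ===== PORT A =====
-- module-level Positions dict, shared by both ports
def pvPositions : PySem.Dict String (List Int) :=
  PySem.Dict.ofList [("0",[0,0]),("1",[1,0]),("2",[2,0]),("3",[3,0]),
   ("4",[0,1]),("5",[1,1]),("6",[2,1]),("7",[3,1]),
   ("8",[0,2]),("9",[1,2]),("10",[2,2]),("11",[3,2]),
   ("12",[0,3]),("13",[1,3]),("14",[2,3]),("15",[3,3])]

-- Positions['{0}'.format(i)]; KeyError (i ≥ 16) is excluded by Pre_, so getD's default is never claimed
def pvPos (i : Nat) : List Int := pvPositions.getD (PySem.Int.toStr (i : Int)) []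

-- the `while True: ... b.index(a) ... b[e] = '#'` loop; fuel = len(b)+1 suffices whenever the
-- Python loop terminates (each step erases one occurrence of a when a ≠ '#'; a = '#' with a in b,
-- where the Python diverges or raises KeyError, lies outside Pre_)
def assignNumsLoop (a : Char) : Nat → List Char → List (List Int) → List (List Int)
  | 0, _, z => z
  | fuel+1, b, z =>
    match PySem.List.index? b a with
    | some e => assignNumsLoop a fuel (b.set e '#') (z ++ [pvPos e])
    | none => z

def assignNums (Input : String) (Surface : String) (valueOn : Int) : List (List Int) :=
  match PySem.Str.pyGet? Input valueOn with
  | none => []   -- IndexError; outside Pre_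
  | some a => assignNumsLoop a (Surface.toList.length + 1) Surface.toList []

-- ===== PORT B =====
-- the `for i, ch in enumerate(Surface)` loop of Source B, appending Positions[str(i)] on a match
def assignNumsAltLoop (a : Char) (i : Nat) : List Char → List (List Int)
  | [] => []
  | ch :: rest => (if ch = a then [pvPos i] else []) ++ assignNumsAltLoop a (i+1) rest

def assignNums_alt (Input : String) (Surface : String) (valueOn : Int) : List (List Int) :=
  match PySem.Str.pyGet? Input valueOn with
  | none => []   -- IndexError; outside Pre_
  | some a => assignNumsAltLoop a 0 Surface.toList

-- ===== PRECONDITION & SPEC =====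
-- Pre_ excludes only inputs where Python A does not return: valueOn out of range (IndexError),
-- an occurrence of the target at index ≥ 16 (KeyError), and target '#' present in Surface
-- (A's loop rewrites '#' to '#' and never terminates, or hits the KeyError first).
def pvPreB (Input : String) (Surface : String) (valueOn : Int) : Bool :=
  match PySem.Str.pyGet? Input valueOn with
  | none => false
  | some a => (!(a == '#') || !(Surface.toList.contains a))
              && !((Surface.toList.drop 16).contains a)
def Pre_assignNums (Input : String) (Surface : String) (valueOn : Int) : Prop :=
  pvPreB Input Surface valueOn = true
instance (Input : String) (Surface : String) (valueOn : Int) : Decidable (Pre_assignNums Input Surface valueOn) := by unfold Pre_assignNums; infer_instance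
def pvWitness_assignNums : String × String × Int := ("a", "aba", 0)

def Spec_assignNums (Input : String) (Surface : String) (valueOn : Int) (out : List (List Int)) : Prop := out = assignNums_alt Input Surface valueOn
instance (Input : String) (Surface : String) (valueOn : Int) (out : List (List Int)) : Decidable (Spec_assignNums Input Surface valueOn out) := by unfold Spec_assignNums; infer_instance

-- ===== CLAIM (what is proved, stated in full; the proofs are below) =====
def Claim_equal_assignNums : Prop := ∀ (Input : String) (Surface : String) (valueOn : Int), Dom_assignNums Input Surface valueOn → Pre_assignNums Input Surface valueOn → Spec_assignNums Input Surface valueOn (assignNums Input Surface valueOn)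

-- ===== LEMMAS AND PROOFS =====

theorem findIdxs_nil_of_not_mem {a : Char} {b : List Char} {s : Nat} (h : a ∉ b) :
    List.findIdxs (· == a) b s = [] :=
  List.findIdxs_eq_nil_iff.mpr (fun x hx => by
    simp only [beq_eq_false_iff_ne]; rintro rfl; exact h hx)

theorem altLoop_eq_findIdxs (a : Char) (b : List Char) (i : Nat) :
    assignNumsAltLoop a i b = (List.findIdxs (· == a) b i).map pvPos := by
  induction b generalizing i with
  | nil => simp [assignNumsAltLoop]
  | cons c cs ih =>
    by_cases hc : c = a
    · subst hc
      simp [assignNumsAltLoop, List.findIdxs_cons, ih (i+1)]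
    · simp [assignNumsAltLoop, hc, List.findIdxs_cons,
        (by simpa using hc : ¬ (c == a) = true), ih (i+1)]

theorem aLoop_eq_findIdxs (a : Char) :
    ∀ (fuel : Nat) (b : List Char) (z : List (List Int)),
      (a = '#' → a ∉ b) → b.count a < fuel →
      assignNumsLoop a fuel b z = z ++ (List.findIdxs (· == a) b).map pvPos := by
  intro fuel
  induction fuel with
  | zero => intro b z _ h; omega
  | succ fuel ih =>
    intro b z hh h
    rcases he : PySem.List.index? b a with _ | e
    · have hnm : a ∉ b := (PySem.List.index?_eq_none_iff b a).mp he
      rw [findIdxs_nil_of_not_mem hnm]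
      simp only [assignNumsLoop]
      rw [he]
      simp
    · have hmem : a ∈ b := (PySem.List.index?_isSome_iff b a).mp (by rw [he]; rfl)
      have hne : a ≠ '#' := fun hsh => (hh hsh) hmem
      obtain ⟨pre, suf, hb, hlen, hpre⟩ := (PySem.List.index?_eq_some_iff b a e).mp he
      subst hb; subst hlen
      have hset : (pre ++ a :: suf).set pre.length '#' = pre ++ '#' :: suf := by
        rw [List.set_append_right _ _ (Nat.le_refl _)]
        simp
      have hfi : List.findIdxs (· == a) (pre ++ a :: suf)
          = pre.length :: List.findIdxs (· == a) suf (pre.length + 1) := by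
        rw [List.findIdxs_append, findIdxs_nil_of_not_mem hpre]
        simp [List.findIdxs_cons]
      have hfi2 : List.findIdxs (· == a) (pre ++ '#' :: suf)
          = List.findIdxs (· == a) suf (pre.length + 1) := by
        rw [List.findIdxs_append, findIdxs_nil_of_not_mem hpre]
        simp [List.findIdxs_cons, Ne.symm hne]
      have hcount : (pre ++ '#' :: suf).count a < fuel := by
        have h1 : (pre ++ a :: suf).count a = (pre ++ '#' :: suf).count a + 1 := by
          simp [List.count_append, Ne.symm hne]
          omega
        omega
      simp only [assignNumsLoop, he]
      rw [hset, ih _ _ (fun hsh => absurd hsh hne) hcount, hfi, hfi2]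
      simp

-- ===== VERDICT (by name: the statement is the Claim_ definition above) =====
theorem assignNums_spec : Claim_equal_assignNums := by
  unfold Claim_equal_assignNums
  intro Input Surface valueOn _ hpre
  unfold Pre_assignNums pvPreB at hpre
  unfold Spec_assignNums assignNums assignNums_alt
  rcases hg : PySem.Str.pyGet? Input valueOn with _ | a
  · rw [hg] at hpre
  · rw [hg] at hpre
    simp only [Bool.and_eq_true, Bool.or_eq_true, beq_eq_false_iff_ne,
      List.contains_eq_mem, Bool.not_eq_eq_eq_not, Bool.not_true, decide_eq_false_iff_not] at hpre
    have hprop : a = '#' → a ∉ Surface.toList := by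
      rcases hpre.1 with h | h
      · exact fun hh => absurd hh h
      · exact fun _ => h
    show assignNumsLoop a (Surface.toList.length + 1) Surface.toList []
        = assignNumsAltLoop a 0 Surface.toList
    rw [aLoop_eq_findIdxs a _ _ _ hprop
          (Nat.lt_succ_of_le (List.count_le_length)),
        altLoop_eq_findIdxs]
    simp
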